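-- pv_equiv track=rewrite | github.com/buriy/django-beautils | commons/groupers.py | regroup
-- ===== SOURCE A (Python) =====
-- def regroup(pairs, size=1):
--     group_dict = {}
--     last = None
--     for item, value in pairs:
--         group = item[:-size]
--         if size == 1:
--             key = item[-1]
--         else:
--             key = item[-size:]
--         if last is None:
--             last = group
--         elif last != group:
--             yield last, group_dict
--             last = group
--             group_dict = {}
--         group_dict[key] = value
--     if group_dict:
--         yield last, group_dict
-- ===== SOURCE B (Python) =====
-- def regroup(pairs, size=1):
--     pairs = list(pairs)
--     n = len(pairs)
--     i = 0
--     while i < n: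
--         prefix = pairs[i][0][:-size]
--         d = {}
--         while i < n and pairs[i][0][:-size] == prefix:
--             item, value = pairs[i]
--             d[item[-1] if size == 1 else item[-size:]] = value
--             i += 1
--         yield prefix, d
-- ===== Notes on version B (the rewrite author's own statement) =====
-- stated objective: idiomatic
-- what changed: Replaced A's flat state machine (pending prefix + dict with an explicit flush and a trailing 'if group_dict' guard) by a run-at-a-time loop: each iteration takes the next prefix and consumes its whole consecutive run into a fresh dict before yielding.
import Mathlib
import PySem

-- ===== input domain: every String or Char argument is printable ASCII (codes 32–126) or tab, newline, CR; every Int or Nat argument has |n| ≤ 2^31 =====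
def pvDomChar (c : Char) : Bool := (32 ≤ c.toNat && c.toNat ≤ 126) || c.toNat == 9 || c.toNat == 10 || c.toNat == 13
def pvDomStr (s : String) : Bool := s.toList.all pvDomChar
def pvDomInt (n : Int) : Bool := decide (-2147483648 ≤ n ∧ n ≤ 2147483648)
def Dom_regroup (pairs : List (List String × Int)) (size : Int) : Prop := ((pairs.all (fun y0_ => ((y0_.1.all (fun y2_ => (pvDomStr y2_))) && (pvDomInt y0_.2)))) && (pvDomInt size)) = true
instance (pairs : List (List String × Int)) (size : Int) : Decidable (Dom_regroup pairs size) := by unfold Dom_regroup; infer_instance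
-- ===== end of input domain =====

-- B replaces A's flat state machine (pending group + explicit flush) by consuming one whole
-- run of equal prefixes at a time (idiomatic; no speed claim). Both are generators; the
-- equivalence is about the yielded sequence of (prefix, dict) pairs.

-- ===== PORT A =====
-- group = item[:-size]  (shared by both ports: both Pythons compute exactly this slice)
def regroupPrefix (item : List String) (size : Int) : List String :=
  PySem.List.slice item none (some (-size))

-- key = item[-1] if size == 1 else item[-size:]
-- size ≠ 1: Python's key is a LIST, and dict assignment raises TypeError (excluded by Pre_);
-- size = 1 with item = []: item[-1] raises IndexError (excluded by Pre_). We return "" there.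
def regroupKey (item : List String) (size : Int) : String :=
  if size == 1 then (PySem.List.pyGet? item (-1)).getD "" else ""

-- the for-loop with state (group_dict, last), plus the trailing 'if group_dict: yield'
def regroupGo (size : Int) : List (List String × Int) → PySem.Dict String Int →
    Option (List String) → List (List String × (List (String × Int)))
  | [], gd, last => if gd.items ≠ [] then [(last.getD [], gd.items)] else []
  | (item, value) :: rest, gd, last =>
    let group := regroupPrefix item size
    let key := regroupKey item size
    match last with
    | none => regroupGo size rest (gd.insert key value) (some group)
    | some l =>
      if l ≠ group then
        (l, gd.items) :: regroupGo size rest (PySem.Dict.empty.insert key value) (some group)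
      else
        regroupGo size rest (gd.insert key value) (some group)

def regroup (pairs : List (List String × Int)) (size : Int) :
    List (List String × (List (String × Int))) :=
  regroupGo size pairs PySem.Dict.empty none

-- ===== PORT B =====
-- Source B: outer loop takes the prefix of the first remaining pair, the inner while-loop
-- consumes the whole run sharing that prefix into a fresh dict; here: takeWhile/dropWhile
-- split off the run, structural recursion on the rest.
def regroup_alt (pairs : List (List String × Int)) (size : Int) :
    List (List String × (List (String × Int))) :=
  match pairs with
  | [] => []
  | pv :: rest =>
    let pfx := regroupPrefix pv.1 size
    let run := pv :: rest.takeWhile (fun q => regroupPrefix q.1 size == pfx)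
    let rest' := rest.dropWhile (fun q => regroupPrefix q.1 size == pfx)
    (pfx,
      (run.foldl (fun d q => d.insert (regroupKey q.1 size) q.2) PySem.Dict.empty).items)
      :: regroup_alt rest' size
termination_by pairs.length
decreasing_by
  simp only [List.length_cons]
  exact Nat.lt_succ_of_le (List.length_dropWhile_le _ _)

-- ===== PRECONDITION & SPEC =====
-- Pre_ excludes exactly the inputs where Python A raises: with nonempty pairs and size ≠ 1
-- the dict key item[-size:] is a list (TypeError), and with size = 1 an empty item makes
-- item[-1] raise IndexError. A returns on every other input, and all of those are admitted.
def Pre_regroup (pairs : List (List String × Int)) (size : Int) : Prop :=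
  pairs = [] ∨ (size = 1 ∧ ∀ pv ∈ pairs, pv.1 ≠ [])
instance (pairs : List (List String × Int)) (size : Int) : Decidable (Pre_regroup pairs size) := by
  unfold Pre_regroup; infer_instance

def pvWitness_regroup : (List (List String × Int)) × Int :=
  ([(["a", "x"], 1), (["a", "y"], 2), (["b", "z"], 3)], 1)

def Spec_regroup (pairs : List (List String × Int)) (size : Int) (out : List (List String × (List (String × Int)))) : Prop := out = regroup_alt pairs size
instance (pairs : List (List String × Int)) (size : Int) (out : List (List String × (List (String × Int)))) : Decidable (Spec_regroup pairs size out) := by unfold Spec_regroup; infer_instance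

-- ===== CLAIM (what is proved, stated in full; the proofs are below) =====
def Claim_equal_regroup : Prop := ∀ (pairs : List (List String × Int)) (size : Int), Dom_regroup pairs size → Pre_regroup pairs size → Spec_regroup pairs size (regroup pairs size)

-- ===== LEMMAS AND PROOFS =====

theorem regroup_alt_cons (pv : List String × Int) (rest : List (List String × Int)) (size : Int) :
    regroup_alt (pv :: rest) size =
      (regroupPrefix pv.1 size,
        ((pv :: rest.takeWhile (fun q => regroupPrefix q.1 size == regroupPrefix pv.1 size)).foldl
          (fun d q => d.insert (regroupKey q.1 size) q.2) PySem.Dict.empty).items)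
        :: regroup_alt (rest.dropWhile
            (fun q => regroupPrefix q.1 size == regroupPrefix pv.1 size)) size := by
  rw [regroup_alt]

theorem insert_items_ne_nil (d : PySem.Dict String Int) (k : String) (v : Int) :
    (d.insert k v).items ≠ [] := by
  simp only [PySem.Dict.insert]
  split
  · next h =>
    simp only [ne_eq, List.map_eq_nil_iff]
    intro hnil
    rw [show d = PySem.Dict.mk d.items from rfl, hnil] at h
    simp [PySem.Dict.contains] at h
  · simp

-- A's state machine, once a group l with a nonempty pending dict gd is open, emits
-- (l, gd extended by the rest of l's run) and then behaves like B on what remains.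
theorem regroupGo_run (size : Int) (rest : List (List String × Int))
    (l : List String) (gd : PySem.Dict String Int) (hgd : gd.items ≠ []) :
    regroupGo size rest gd (some l) =
      (l, ((rest.takeWhile (fun q => regroupPrefix q.1 size == l)).foldl
            (fun d q => d.insert (regroupKey q.1 size) q.2) gd).items)
        :: regroup_alt (rest.dropWhile (fun q => regroupPrefix q.1 size == l)) size := by
  induction rest generalizing l gd with
  | nil => simp [regroupGo, hgd, regroup_alt]
  | cons q rest ih =>
    obtain ⟨item, value⟩ := q
    by_cases hg : l = regroupPrefix item size
    · have hq : (fun q : List String × Int => regroupPrefix q.1 size == l) (item, value) = true := by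
        simp [← hg]
      rw [show regroupGo size ((item, value) :: rest) gd (some l) =
            regroupGo size rest (gd.insert (regroupKey item size) value)
              (some (regroupPrefix item size)) by simp [regroupGo, hg]]
      rw [← hg, ih l _ (insert_items_ne_nil gd _ _)]
      simp [hq]
    · have hq : (fun q : List String × Int => regroupPrefix q.1 size == l) (item, value) = false := by
        simp; exact fun h => hg h.symm
      rw [show regroupGo size ((item, value) :: rest) gd (some l) =
            (l, gd.items) :: regroupGo size rest
              (PySem.Dict.empty.insert (regroupKey item size) value)
              (some (regroupPrefix item size)) by simp [regroupGo, hg]]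
      rw [ih _ _ (insert_items_ne_nil _ _ _)]
      simp only [List.takeWhile_cons, List.dropWhile_cons, hq, if_neg Bool.false_ne_true,
        List.foldl_nil]
      rw [regroup_alt_cons]
      simp [List.foldl_cons]

-- ===== VERDICT (by name: the statement is the Claim_ definition above) =====
theorem regroup_spec : Claim_equal_regroup := by
  intro pairs size _ _
  unfold Spec_regroup regroup
  match pairs with
  | [] => rw [regroup_alt]; rfl
  | (item, value) :: rest =>
    rw [show regroupGo size ((item, value) :: rest) PySem.Dict.empty none =
          regroupGo size rest (PySem.Dict.empty.insert (regroupKey item size) value)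
            (some (regroupPrefix item size)) from rfl]
    rw [regroupGo_run size rest _ _ (insert_items_ne_nil _ _ _)]
    rw [regroup_alt_cons]
    simp [List.foldl_cons]
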